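-- pv_equiv track=rewrite | github.com/pypi-data/pypi-mirror-182 | packages/MusicOnPolytopes/MusicOnPolytopes-0.1.0-py3-none-any.whl/polytopes/model/triad_manipulation.py | is_maj_min_triad_from_notes
-- ===== SOURCE A (Python) =====
-- def is_maj_min_triad_from_notes(list_of_notes_numbers):
--     if len(list_of_notes_numbers) != 3:
--         return False
--     for i in range(3):
--         root = list_of_notes_numbers[i]
--         first_gap = (list_of_notes_numbers[(i+1)%3] - root)%12
--         second_gap = (list_of_notes_numbers[(i+2)%3] - root)%12
--         if first_gap == 7:
--             if second_gap == 3 or second_gap == 4: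
--                 return True
--         elif second_gap == 7:
--             if first_gap == 3 or first_gap == 4:
--                 return True
--     return False
-- ===== SOURCE B (Python) =====
-- def is_maj_min_triad_from_notes(list_of_notes_numbers):
--     if len(list_of_notes_numbers) != 3:
--         return False
--     pcs = sorted(n % 12 for n in list_of_notes_numbers)
--     gaps = [pcs[1] - pcs[0], pcs[2] - pcs[1], pcs[0] + 12 - pcs[2]]
--     return sorted(gaps) == [3, 4, 5]
-- ===== Notes on version B (the rewrite author's own statement) =====
-- stated objective: simpler
-- what changed: Replaces the three-root rotational interval scan (nested branch logic per rotation) with a single sort of the pitch classes mod 12 and a check that the three circular gaps, sorted, are 3, 4 and 5.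
import Mathlib
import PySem

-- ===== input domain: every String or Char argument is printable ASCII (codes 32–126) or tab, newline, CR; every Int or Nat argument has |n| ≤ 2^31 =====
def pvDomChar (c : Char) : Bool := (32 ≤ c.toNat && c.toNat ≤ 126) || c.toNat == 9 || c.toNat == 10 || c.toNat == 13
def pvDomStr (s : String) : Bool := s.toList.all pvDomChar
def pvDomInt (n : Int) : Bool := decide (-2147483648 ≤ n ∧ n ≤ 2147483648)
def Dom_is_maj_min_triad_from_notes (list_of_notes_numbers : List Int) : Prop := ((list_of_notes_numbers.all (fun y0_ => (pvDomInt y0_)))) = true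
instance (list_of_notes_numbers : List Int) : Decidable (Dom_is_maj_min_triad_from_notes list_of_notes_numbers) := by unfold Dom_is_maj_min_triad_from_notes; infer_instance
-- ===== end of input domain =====

-- B replaces A's three-root rotational interval scan by sorting the pitch classes mod 12
-- and checking the canonical circular-gap signature sorted(gaps) == [3,4,5] (objective: simpler).

-- ===== PORT A =====
def is_maj_min_triad_from_notes (list_of_notes_numbers : List Int) : Bool :=
  if list_of_notes_numbers.length ≠ 3 then false
  else
    (PySem.List.pyRange 0 3 1).any (fun i =>
      let root := PySem.List.pyGetD list_of_notes_numbers i 0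
      let first_gap := PySem.Int.mod (PySem.List.pyGetD list_of_notes_numbers (PySem.Int.mod (i+1) 3) 0 - root) 12
      let second_gap := PySem.Int.mod (PySem.List.pyGetD list_of_notes_numbers (PySem.Int.mod (i+2) 3) 0 - root) 12
      if first_gap = 7 then (second_gap = 3 || second_gap = 4)
      else if second_gap = 7 then (first_gap = 3 || first_gap = 4)
      else false)

-- ===== PORT B =====
def is_maj_min_triad_from_notes_alt (list_of_notes_numbers : List Int) : Bool :=
  if list_of_notes_numbers.length ≠ 3 then false
  else
    let pcs := PySem.List.sorted (list_of_notes_numbers.map (fun n => PySem.Int.mod n 12)) id false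
    let gaps := [PySem.List.pyGetD pcs 1 0 - PySem.List.pyGetD pcs 0 0,
                 PySem.List.pyGetD pcs 2 0 - PySem.List.pyGetD pcs 1 0,
                 PySem.List.pyGetD pcs 0 0 + 12 - PySem.List.pyGetD pcs 2 0]
    PySem.List.sorted gaps id false = [3, 4, 5]

-- ===== PRECONDITION & SPEC =====
def Spec_is_maj_min_triad_from_notes (list_of_notes_numbers : List Int) (out : Bool) : Prop := out = is_maj_min_triad_from_notes_alt list_of_notes_numbers
instance (list_of_notes_numbers : List Int) (out : Bool) : Decidable (Spec_is_maj_min_triad_from_notes list_of_notes_numbers out) := by unfold Spec_is_maj_min_triad_from_notes; infer_instance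

-- ===== CLAIM (what is proved, stated in full; the proofs are below) =====
def Claim_equal_is_maj_min_triad_from_notes : Prop := ∀ (list_of_notes_numbers : List Int), Dom_is_maj_min_triad_from_notes list_of_notes_numbers → Spec_is_maj_min_triad_from_notes list_of_notes_numbers (is_maj_min_triad_from_notes list_of_notes_numbers)

-- ===== LEMMAS AND PROOFS =====

-- Both programs only depend on the three pitch classes mod 12.
theorem pv_mod_sub (u v : Int) :
    PySem.Int.mod (PySem.Int.mod v 12 - PySem.Int.mod u 12) 12 = PySem.Int.mod (v - u) 12 := by
  simp [Int.sub_emod_emod, Int.emod_sub_emod]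

theorem pv_mod_idem (a : Int) :
    PySem.Int.mod (PySem.Int.mod a 12) 12 = PySem.Int.mod a 12 := by
  simp [Int.emod_emod_of_dvd]

theorem pvA_mod (a b c : Int) :
    is_maj_min_triad_from_notes [a, b, c]
      = is_maj_min_triad_from_notes [PySem.Int.mod a 12, PySem.Int.mod b 12, PySem.Int.mod c 12] := by
  have hr : PySem.List.pyRange 0 3 1 = [0, 1, 2] := by decide
  have h01 : PySem.Int.mod ((0:Int)+1) 3 = 1 := by decide
  have h02 : PySem.Int.mod ((0:Int)+2) 3 = 2 := by decide
  have h11 : PySem.Int.mod ((1:Int)+1) 3 = 2 := by decide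
  have h12 : PySem.Int.mod ((1:Int)+2) 3 = 0 := by decide
  have h21 : PySem.Int.mod ((2:Int)+1) 3 = 0 := by decide
  have h22 : PySem.Int.mod ((2:Int)+2) 3 = 1 := by decide
  have g0 : ∀ x y z : Int, PySem.List.pyGetD [x, y, z] 0 0 = x := by
    intro x y z; simp [PySem.List.pyGetD, PySem.List.pyGet?, PySem.List.pyIdx?]
  have g1 : ∀ x y z : Int, PySem.List.pyGetD [x, y, z] 1 0 = y := by
    intro x y z; simp [PySem.List.pyGetD, PySem.List.pyGet?, PySem.List.pyIdx?]
  have g2 : ∀ x y z : Int, PySem.List.pyGetD [x, y, z] 2 0 = z := by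
    intro x y z; simp [PySem.List.pyGetD, PySem.List.pyGet?, PySem.List.pyIdx?]
  simp only [is_maj_min_triad_from_notes, hr, List.any_cons, List.any_nil,
    h01, h02, h11, h12, h21, h22, g0, g1, g2, pv_mod_sub,
    List.length_cons, List.length_nil]

theorem pvB_mod (a b c : Int) :
    is_maj_min_triad_from_notes_alt [a, b, c]
      = is_maj_min_triad_from_notes_alt [PySem.Int.mod a 12, PySem.Int.mod b 12, PySem.Int.mod c 12] := by
  simp only [is_maj_min_triad_from_notes_alt, List.map, pv_mod_idem]
  rfl

-- the finite core: equality on all 12³ pitch-class triples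
theorem pv_key : ∀ x y z : Fin 12,
    is_maj_min_triad_from_notes [(x : Int), (y : Int), (z : Int)]
      = is_maj_min_triad_from_notes_alt [(x : Int), (y : Int), (z : Int)] := by
  decide

theorem pv_fin_of_mod (a : Int) : ∃ x : Fin 12, (x : Int) = PySem.Int.mod a 12 := by
  have h1 : 0 ≤ PySem.Int.mod a 12 := PySem.Int.mod_nonneg a (by norm_num)
  have h2 : PySem.Int.mod a 12 < 12 := PySem.Int.mod_lt a (by norm_num)
  exact ⟨⟨(PySem.Int.mod a 12).toNat, by omega⟩, by simp; omega⟩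

-- ===== VERDICT (by name: the statement is the Claim_ definition above) =====
theorem is_maj_min_triad_from_notes_spec : Claim_equal_is_maj_min_triad_from_notes := by
  intro l _
  unfold Spec_is_maj_min_triad_from_notes
  match l with
  | [] => rfl
  | [_] => rfl
  | [_, _] => rfl
  | (_ :: _ :: _ :: _ :: _) => rfl
  | [a, b, c] =>
    obtain ⟨x, hx⟩ := pv_fin_of_mod a
    obtain ⟨y, hy⟩ := pv_fin_of_mod b
    obtain ⟨z, hz⟩ := pv_fin_of_mod c
    rw [pvA_mod, pvB_mod, ← hx, ← hy, ← hz]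
    exact pv_key x y z
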